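-- pv_equiv track=rewrite | github.com/vyomkeshj/goku-moku | env/utils.py | get_sequences_in_array
-- ===== SOURCE A (Python) =====
-- EMPTY = 0
--
-- def get_sequences_in_array(array):
--     sequences = []
--     tmp_seq = []
--     tmp_opening = 0
--     for i, item in enumerate(array):
--         if i > 0:
--             last_item = array[i - 1]
--             if item != EMPTY:
--                 if last_item != item:
--                     if last_item == EMPTY:
--                         tmp_opening = 1
--                         tmp_seq.append(item)
--                     else:
--                         if (len(tmp_seq) > 1):
--                             sequences.append([tmp_seq[0], tmp_opening, len(tmp_seq)])
--                         tmp_seq = []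
--                         tmp_opening = 0
--                 else:
--                     if (len(tmp_seq) < 1):
--                         tmp_seq.append(last_item)
--                     tmp_seq.append(item)
--             elif last_item != item:
--                 if len(tmp_seq) > 1:
--                     sequences.append([tmp_seq[0], tmp_opening + 1, len(tmp_seq)])
--                 tmp_seq = []
--                 tmp_opening = 0
--     if len(tmp_seq) > 1:
--         sequences.append([tmp_seq[0], tmp_opening, len(tmp_seq)])
--     return sequences
-- ===== SOURCE B (Python) =====
-- EMPTY = 0
--
-- def get_sequences_in_array(array):
--     # phase 1: table of maximal runs of equal values, as (value, length)
--     runs = []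
--     for x in array:
--         if runs and runs[-1][0] == x:
--             runs[-1] = (x, runs[-1][1] + 1)
--         else:
--             runs.append((x, 1))
--     # phase 2: report non-EMPTY runs of length >= 2 with their open (EMPTY-adjacent) ends
--     out = []
--     for j, (v, n) in enumerate(runs):
--         if v != EMPTY and n >= 2:
--             left = 1 if j > 0 and runs[j - 1][0] == EMPTY else 0
--             right = 1 if j + 1 < len(runs) and runs[j + 1][0] == EMPTY else 0
--             out.append([v, left + right, n])
--     return out
-- ===== Notes on version B (the rewrite author's own statement) =====
-- stated objective: simpler
-- what changed: Replaces the interleaved single-pass state machine (tmp_seq/tmp_opening bookkeeping) with a two-phase decomposition: first compute the list of maximal (value, length) runs, then walk the run table emitting [value, open_ends, length] for non-EMPTY runs of length >= 2, with open ends read off the neighbouring runs.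
import Mathlib
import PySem

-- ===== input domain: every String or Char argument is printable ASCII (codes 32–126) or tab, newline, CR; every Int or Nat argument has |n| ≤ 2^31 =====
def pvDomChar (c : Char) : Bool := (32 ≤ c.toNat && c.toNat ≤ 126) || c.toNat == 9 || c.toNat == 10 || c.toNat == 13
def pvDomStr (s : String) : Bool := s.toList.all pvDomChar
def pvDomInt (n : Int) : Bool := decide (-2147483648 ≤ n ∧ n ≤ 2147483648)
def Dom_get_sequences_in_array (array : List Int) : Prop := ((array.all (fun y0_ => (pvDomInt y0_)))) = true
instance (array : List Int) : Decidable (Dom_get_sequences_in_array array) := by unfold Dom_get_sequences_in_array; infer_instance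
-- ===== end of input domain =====

-- B replaces A's single-pass state machine by a runs-table-then-scan decomposition (simpler; same O(n) cost); return values proved equal on all inputs.

def EMPTY : Int := 0

-- ===== PORT A =====
-- loop body of A's 'for i, item in enumerate(array)' (literal, array[i-1] via pyGetD)
def bodyA (array : List Int) (st : List (List Int) × List Int × Int) (p : Int × Int) :
    List (List Int) × List Int × Int :=
  let sequences := st.1
  let tmp_seq := st.2.1
  let tmp_opening := st.2.2
  let i := p.1
  let item := p.2
  if i > 0 then
    let last_item := PySem.List.pyGetD array (i - 1) 0
    if item ≠ EMPTY then
      if last_item ≠ item then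
        if last_item = EMPTY then
          (sequences, tmp_seq ++ [item], 1)
        else
          (if tmp_seq.length > 1 then
            sequences ++ [[PySem.List.pyGetD tmp_seq 0 0, tmp_opening, (tmp_seq.length : Int)]]
           else sequences, [], 0)
      else
        let tmp_seq := if tmp_seq.length < 1 then tmp_seq ++ [last_item, item] else tmp_seq ++ [item]
        (sequences, tmp_seq, tmp_opening)
    else if last_item ≠ item then
      (if tmp_seq.length > 1 then
        sequences ++ [[PySem.List.pyGetD tmp_seq 0 0, tmp_opening + 1, (tmp_seq.length : Int)]]
       else sequences, [], 0)
    else st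
  else st

def get_sequences_in_array (array : List Int) : List (List Int) :=
  let st := (PySem.List.enumerate array 0).foldl (bodyA array) ([], [], 0)
  if st.2.1.length > 1 then
    st.1 ++ [[PySem.List.pyGetD st.2.1 0 0, st.2.2, (st.2.1.length : Int)]]
  else st.1

-- ===== PORT B =====
-- phase 1 loop body: extend the last run or start a new one (Source B's runs loop)
def stepRuns (acc : List (Int × Int)) (x : Int) : List (Int × Int) :=
  if h : acc ≠ [] then
    if (acc.getLast h).1 == x then
      acc.dropLast ++ [(x, (acc.getLast h).2 + 1)]
    else acc ++ [(x, 1)]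
  else acc ++ [(x, 1)]

-- phase 2 loop body: one run-table entry, neighbours via pyGetD (Source B's enumerate loop)
def bodyB (runs : List (Int × Int)) (out : List (List Int)) (p : Int × (Int × Int)) :
    List (List Int) :=
  let j := p.1
  let v := p.2.1
  let n := p.2.2
  if v ≠ EMPTY ∧ n ≥ 2 then
    let left : Int := if j > 0 ∧ (PySem.List.pyGetD runs (j - 1) (0, 0)).1 == EMPTY then 1 else 0
    let right : Int :=
      if j + 1 < (runs.length : Int) ∧ (PySem.List.pyGetD runs (j + 1) (0, 0)).1 == EMPTY then 1
      else 0
    out ++ [[v, left + right, n]]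
  else out

def get_sequences_in_array_alt (array : List Int) : List (List Int) :=
  let runs := array.foldl stepRuns []
  (PySem.List.enumerate runs 0).foldl (bodyB runs) []

-- ===== PRECONDITION & SPEC =====
def Spec_get_sequences_in_array (array : List Int) (out : List (List Int)) : Prop := out = get_sequences_in_array_alt array
instance (array : List Int) (out : List (List Int)) : Decidable (Spec_get_sequences_in_array array out) := by unfold Spec_get_sequences_in_array; infer_instance

-- ===== CLAIM (what is proved, stated in full; the proofs are below) =====
def Claim_equal_get_sequences_in_array : Prop := ∀ (array : List Int), Dom_get_sequences_in_array array → Spec_get_sequences_in_array array (get_sequences_in_array array)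

-- ===== LEMMAS AND PROOFS =====

-- proof-side recursive characterisations of B's two loops
def pyRuns (xs : List Int) : List (Int × Int) :=
  match xs with
  | [] => []
  | v :: t =>
    (v, (1 + (t.takeWhile (· == v)).length : Int)) :: pyRuns (t.dropWhile (· == v))
termination_by xs.length
decreasing_by
  have := List.length_dropWhile_le (· == v) t
  simp; omega

-- walk the run table (Source B's _emit)
def pyEmit (prevEmpty : Bool) (runs : List (Int × Int)) : List (List Int) :=
  match runs with
  | [] => []
  | (v, n) :: rest =>
    let out := pyEmit (v == EMPTY) rest
    if v ≠ EMPTY ∧ n ≥ 2 then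
      let opens : Int := (if prevEmpty then 1 else 0) +
        (if (match rest with | (w, _) :: _ => w == EMPTY | [] => false) then 1 else 0)
      [v, opens, n] :: out
    else out


def pyRunsCont (v c : Int) (t : List Int) : List (Int × Int) :=
  (v, c + ((t.takeWhile (· == v)).length : Int)) :: pyRuns (t.dropWhile (· == v))

def prevE (pre : List (Int × Int)) : Bool :=
  match pre.getLast? with
  | none => false
  | some p => p.1 == 0


-- semantic per-element step of A's machine once i > 0 and last_item is known
def pairStep (st : List (List Int) × List Int × Int) (last item : Int) :
    List (List Int) × List Int × Int :=
  if item ≠ EMPTY then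
    if last ≠ item then
      if last = EMPTY then
        (st.1, st.2.1 ++ [item], 1)
      else
        (if st.2.1.length > 1 then
          st.1 ++ [[PySem.List.pyGetD st.2.1 0 0, st.2.2, (st.2.1.length : Int)]]
         else st.1, [], 0)
    else
      (st.1, if st.2.1.length < 1 then st.2.1 ++ [last, item] else st.2.1 ++ [item], st.2.2)
  else if last ≠ item then
    (if st.2.1.length > 1 then
      st.1 ++ [[PySem.List.pyGetD st.2.1 0 0, st.2.2 + 1, (st.2.1.length : Int)]]
     else st.1, [], 0)
  else st

def Aloop (prev : Int) (st : List (List Int) × List Int × Int) :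
    List Int → List (List Int) × List Int × Int
  | [] => st
  | x :: xs => Aloop x (pairStep st prev x) xs

def finalizeA (st : List (List Int) × List Int × Int) : List (List Int) :=
  if st.2.1.length > 1 then
    st.1 ++ [[PySem.List.pyGetD st.2.1 0 0, st.2.2, (st.2.1.length : Int)]]
  else st.1

-- abstract state inside a run: v = current value, b = run entered from EMPTY, m = copies seen
def tmpOf (v : Int) (b : Bool) (m : Nat) : List Int :=
  if v = 0 then [] else if 2 ≤ m then List.replicate m v else if b then [v] else []

def opOf (v : Int) (b : Bool) : Int := if v ≠ 0 ∧ b then 1 else 0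

def nextE : List Int → Int
  | [] => 0
  | y :: _ => if y = 0 then 1 else 0

def emitCont (v : Int) (b : Bool) (m : Nat) (xs : List Int) : List (List Int) :=
  (if v ≠ 0 ∧ 2 ≤ m + (xs.takeWhile (· == v)).length then
    [[v, opOf v b + nextE (xs.dropWhile (· == v)),
      (m : Int) + ((xs.takeWhile (· == v)).length : Int)]]
   else [])
  ++ pyEmit (v == 0) (pyRuns (xs.dropWhile (· == v)))
theorem flush_eq (v : Int) (b : Bool) (m : Nat) (hv : v ≠ 0) (hm : 1 ≤ m)
    (S : List (List Int)) (o : Int) :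
    (if (tmpOf v b m).length > 1 then
      S ++ [[PySem.List.pyGetD (tmpOf v b m) 0 0, o, ((tmpOf v b m).length : Int)]]
     else S)
    = S ++ (if 2 ≤ m then [[v, o, (m : Int)]] else []) := by
  by_cases hm2 : 2 ≤ m
  · obtain ⟨k, rfl⟩ : ∃ k, m = k + 1 := ⟨m - 1, by omega⟩
    simp [tmpOf, hv, hm2, List.replicate_succ, PySem.List.pyGetD_zero_cons]
    omega
  · have hm1 : m = 1 := by omega
    subst hm1
    cases b <;> simp [tmpOf, hv]

theorem tmp_grow (v : Int) (b : Bool) (m : Nat) (hv : v ≠ 0) (hm : 1 ≤ m) :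
    (if tmpOf v b m = [] then tmpOf v b m ++ [v, v] else tmpOf v b m ++ [v])
    = tmpOf v b (m + 1) := by
  by_cases hm2 : 2 ≤ m
  · simp [tmpOf, hv, hm2, show 2 ≤ m + 1 by omega, List.replicate_succ,
      ← List.replicate_succ' (n := m)]
    omega
  · have hm1 : m = 1 := by omega
    subst hm1
    cases b <;> simp [tmpOf, hv, List.replicate_succ]

theorem emitCont_one (x : Int) (xs : List Int) (b : Bool) :
    emitCont x b 1 xs = pyEmit b (pyRuns (x :: xs)) := by
  rw [pyRuns]
  by_cases hx : x = 0
  · subst hx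
    simp [emitCont, pyEmit, EMPTY]
  · rw [show pyEmit b ((x, (1 + ((xs.takeWhile (· == x)).length : Int))) :: pyRuns (xs.dropWhile (· == x)))
        = if x ≠ EMPTY ∧ (1 + ((xs.takeWhile (· == x)).length : Int)) ≥ 2 then
            [x, (if b then (1:Int) else 0) +
              (if (match pyRuns (xs.dropWhile (· == x)) with | (w, _) :: _ => w == EMPTY | [] => false) then (1:Int) else 0),
             (1 + ((xs.takeWhile (· == x)).length : Int))] :: pyEmit (x == EMPTY) (pyRuns (xs.dropWhile (· == x)))
          else pyEmit (x == EMPTY) (pyRuns (xs.dropWhile (· == x))) from rfl]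
    simp only [emitCont, EMPTY, opOf, hx, ne_eq, not_false_iff, true_and, Nat.cast_one]
    simp only [show ((1:Int) + ((xs.takeWhile (· == x)).length : Int) ≥ 2)
        ↔ (2 ≤ 1 + (xs.takeWhile (· == x)).length) from by omega]
    by_cases h2 : 2 ≤ 1 + (xs.takeWhile (· == x)).length
    · simp only [if_pos h2]
      cases hd : xs.dropWhile (· == x) with
      | nil => simp [nextE, pyRuns]
      | cons y ys =>
        rw [pyRuns]
        by_cases hy : y = 0 <;> simp [nextE, hy]
    · simp [if_neg h2]
theorem emitCont_shift (v : Int) (b : Bool) (m : Nat) (xs : List Int) :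
    emitCont v b m (v :: xs) = emitCont v b (m + 1) xs := by
  simp only [emitCont, List.takeWhile_cons, List.dropWhile_cons, beq_self_eq_true, if_true,
    List.length_cons]
  simp only [show ∀ l : Nat, (2 ≤ m + (l + 1)) ↔ (2 ≤ m + 1 + l) from by intro l; omega]
  push_cast
  ring_nf

theorem pyEmit_runs_zero (xs : List Int) (pe : Bool) :
    pyEmit pe (pyRuns ((0 : Int) :: xs)) = pyEmit true (pyRuns (xs.dropWhile (· == (0 : Int)))) := by
  rw [pyRuns]
  rw [show pyEmit pe ((0, (1 + ((xs.takeWhile (· == (0:Int))).length : Int))) :: pyRuns (xs.dropWhile (· == (0:Int))))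
      = if (0:Int) ≠ EMPTY ∧ (1 + ((xs.takeWhile (· == (0:Int))).length : Int)) ≥ 2 then
          [0, (if pe then (1:Int) else 0) +
            (if (match pyRuns (xs.dropWhile (· == (0:Int))) with | (w, _) :: _ => w == EMPTY | [] => false) then (1:Int) else 0),
           (1 + ((xs.takeWhile (· == (0:Int))).length : Int))] :: pyEmit ((0:Int) == EMPTY) (pyRuns (xs.dropWhile (· == (0:Int))))
        else pyEmit ((0:Int) == EMPTY) (pyRuns (xs.dropWhile (· == (0:Int)))) from rfl]
  simp [EMPTY]
theorem bridge (t : List Int) : ∀ (p : List Int) (st : List (List Int) × List Int × Int)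
    (h : p ≠ []),
    (PySem.List.enumerate t (p.length : Int)).foldl (bodyA (p ++ t)) st = Aloop (p.getLast h) st t := by
  induction t with
  | nil => intro p st h; simp [PySem.List.enumerate_nil, Aloop]
  | cons x xs ih =>
    intro p st h
    have hlen : 0 < p.length := List.length_pos_of_ne_nil h
    rw [PySem.List.enumerate_cons, List.foldl_cons, Aloop]
    have hget : PySem.List.pyGetD (p ++ x :: xs) ((p.length : Int) - 1) 0 = p.getLast h := by
      rw [show ((p.length : Int) - 1) = ((p.length - 1 : Nat) : Int) by omega,
        PySem.List.pyGetD_natCast]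
      rw [List.getD_eq_getElem?_getD, List.getElem?_append_left (by omega),
        List.getLast_eq_getElem]
      simp [List.getElem?_eq_getElem (by omega : p.length - 1 < p.length)]
    have hbody : bodyA (p ++ x :: xs) st ((p.length : Int), x) = pairStep st (p.getLast h) x := by
      simp only [bodyA, pairStep]
      rw [if_pos (by exact_mod_cast hlen), hget]
    rw [hbody]
    have h2 : p ++ [x] ≠ [] := by simp
    have := ih (p ++ [x]) (pairStep st (p.getLast h) x) h2
    simp only [List.append_assoc, List.cons_append, List.nil_append, List.length_append,
      List.length_cons, List.length_nil, Nat.cast_add, Nat.cast_one,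
      List.getLast_append] at this
    exact this

theorem main_lemma (xs : List Int) : ∀ (v : Int) (b : Bool) (m : Nat) (seqs : List (List Int)),
    1 ≤ m →
    finalizeA (Aloop v (seqs, tmpOf v b m, opOf v b) xs) = seqs ++ emitCont v b m xs := by
  induction xs with
  | nil =>
    intro v b m seqs hm
    by_cases hv : v = 0
    · subst hv
      simp [Aloop, finalizeA, tmpOf, emitCont, pyRuns, pyEmit]
    · show finalizeA (seqs, tmpOf v b m, opOf v b) = _
      have h1 : finalizeA (seqs, tmpOf v b m, opOf v b)
          = seqs ++ (if 2 ≤ m then [[v, opOf v b, (m : Int)]] else []) := by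
        rw [show finalizeA (seqs, tmpOf v b m, opOf v b)
            = (if (tmpOf v b m).length > 1 then
                seqs ++ [[PySem.List.pyGetD (tmpOf v b m) 0 0, opOf v b, ((tmpOf v b m).length : Int)]]
              else seqs) from rfl]
        exact flush_eq v b m hv hm seqs (opOf v b)
      rw [h1]
      simp [emitCont, nextE, pyRuns, pyEmit, hv]
  | cons x xs ih =>
    intro v b m seqs hm
    show finalizeA (Aloop x (pairStep (seqs, tmpOf v b m, opOf v b) v x) xs) = _
    by_cases hxv : x = v
    · subst hxv
      by_cases hv : x = 0
      · subst hv
        rw [show pairStep (seqs, tmpOf 0 b m, opOf 0 b) 0 0 = (seqs, tmpOf 0 b (m+1), opOf 0 b)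
            from by simp [pairStep, EMPTY, tmpOf]]
        rw [ih 0 b (m+1) seqs (by omega), emitCont_shift]
      · rw [show pairStep (seqs, tmpOf x b m, opOf x b) x x = (seqs, tmpOf x b (m+1), opOf x b)
            from by simp [pairStep, EMPTY, hv]; exact tmp_grow x b m hv hm]
        rw [ih x b (m+1) seqs (by omega), emitCont_shift]
    · by_cases hv : v = 0
      · subst hv
        have hx0 : x ≠ 0 := hxv
        rw [show pairStep (seqs, tmpOf 0 b m, opOf 0 b) 0 x = (seqs, tmpOf x true 1, opOf x true)
            from by simp [pairStep, EMPTY, hx0, Ne.symm hx0, tmpOf, opOf]]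
        rw [ih x true 1 seqs (le_refl 1), emitCont_one]
        congr 1
        simp only [emitCont, List.takeWhile_cons, List.dropWhile_cons]
        rw [show ((x == (0:Int)) = false) from by simp [hx0]]
        simp
      · by_cases hx0 : x = 0
        · subst hx0
          have hstep : pairStep (seqs, tmpOf v b m, opOf v b) v 0
              = (seqs ++ (if 2 ≤ m then [[v, opOf v b + 1, (m : Int)]] else []),
                 tmpOf 0 true 1, opOf 0 true) := by
            have h1 : pairStep (seqs, tmpOf v b m, opOf v b) v 0
                = (if (tmpOf v b m).length > 1 then
                     seqs ++ [[PySem.List.pyGetD (tmpOf v b m) 0 0, opOf v b + 1,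
                       ((tmpOf v b m).length : Int)]]
                   else seqs, [], 0) := by
              simp [pairStep, EMPTY, hv]
            rw [h1, flush_eq v b m hv hm seqs (opOf v b + 1)]
            simp [tmpOf, opOf]
          rw [hstep, ih 0 true 1 _ (le_refl 1), emitCont_one]
          have hemit : emitCont v b m ((0:Int) :: xs)
              = (if 2 ≤ m then [[v, opOf v b + 1, (m : Int)]] else [])
                ++ pyEmit false (pyRuns ((0:Int) :: xs)) := by
            simp only [emitCont, List.takeWhile_cons, List.dropWhile_cons]
            rw [show (((0:Int) == v) = false) from by simp [hxv]]
            simp [nextE, hv, show ((v == (0:Int)) = false) from by simp [hv]]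
          rw [hemit, pyEmit_runs_zero, pyEmit_runs_zero, List.append_assoc]
        · have hvx : v ≠ x := fun h => hxv h.symm
          have hstep : pairStep (seqs, tmpOf v b m, opOf v b) v x
              = (seqs ++ (if 2 ≤ m then [[v, opOf v b, (m : Int)]] else []),
                 tmpOf x false 1, opOf x false) := by
            have h1 : pairStep (seqs, tmpOf v b m, opOf v b) v x
                = (if (tmpOf v b m).length > 1 then
                     seqs ++ [[PySem.List.pyGetD (tmpOf v b m) 0 0, opOf v b,
                       ((tmpOf v b m).length : Int)]]
                   else seqs, [], 0) := by
              simp [pairStep, EMPTY, hx0, hvx, hv]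
            rw [h1, flush_eq v b m hv hm seqs (opOf v b)]
            simp [tmpOf, opOf, hx0]
          rw [hstep, ih x false 1 _ (le_refl 1), emitCont_one]
          have hemit : emitCont v b m (x :: xs)
              = (if 2 ≤ m then [[v, opOf v b, (m : Int)]] else [])
                ++ pyEmit false (pyRuns (x :: xs)) := by
            simp only [emitCont, List.takeWhile_cons, List.dropWhile_cons]
            rw [show ((x == v) = false) from by simp [hxv]]
            simp [nextE, hv, hx0, show ((v == (0:Int)) = false) from by simp [hv]]
          rw [hemit, List.append_assoc]
theorem runsFold_inv (t : List Int) : ∀ (rs : List (Int × Int)) (v c : Int),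
    t.foldl stepRuns (rs ++ [(v, c)]) = rs ++ pyRunsCont v c t := by
  induction t with
  | nil => intro rs v c; simp [pyRunsCont, pyRuns]
  | cons x t ih =>
    intro rs v c
    rw [List.foldl_cons]
    by_cases hvx : v = x
    · subst hvx
      rw [show stepRuns (rs ++ [(v, c)]) v = rs ++ [(v, c + 1)] from by
        simp [stepRuns]]
      rw [ih rs v (c + 1)]
      simp only [pyRunsCont, List.takeWhile_cons, List.dropWhile_cons, beq_self_eq_true,
        if_true, List.length_cons]
      push_cast
      ring_nf
    · rw [show stepRuns (rs ++ [(v, c)]) x = (rs ++ [(v, c)]) ++ [(x, 1)] from by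
        simp [stepRuns, show ((v == x) = false) from by simp [hvx]]]
      rw [ih (rs ++ [(v, c)]) x 1]
      simp only [pyRunsCont, List.takeWhile_cons, List.dropWhile_cons,
        show ((x == v) = false) from by simp; exact fun h => hvx (Eq.symm h),
        Bool.false_eq_true, if_false]
      rw [pyRuns]
      simp

theorem runs_eq (array : List Int) : array.foldl stepRuns [] = pyRuns array := by
  cases array with
  | nil => simp [pyRuns]
  | cons a t =>
    rw [List.foldl_cons, show stepRuns [] a = [] ++ [(a, 1)] from by simp [stepRuns],
      runsFold_inv t [] a 1, pyRuns]
    simp [pyRunsCont]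

theorem pyGetD_append_last {α : Type} (p t : List α) (d : α) (h : p ≠ []) :
    PySem.List.pyGetD (p ++ t) ((p.length : Int) - 1) d = p.getLast h := by
  have hlen : 0 < p.length := List.length_pos_of_ne_nil h
  rw [show ((p.length : Int) - 1) = ((p.length - 1 : Nat) : Int) by omega,
    PySem.List.pyGetD_natCast]
  rw [List.getD_eq_getElem?_getD, List.getElem?_append_left (by omega),
    List.getLast_eq_getElem]
  simp [List.getElem?_eq_getElem (by omega : p.length - 1 < p.length)]

theorem pyGetD_append_next {α : Type} (p : List α) (x w : α) (t : List α) (d : α) :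
    PySem.List.pyGetD (p ++ x :: w :: t) ((p.length : Int) + 1) d = w := by
  rw [show ((p.length : Int) + 1) = ((p.length + 1 : Nat) : Int) by omega,
    PySem.List.pyGetD_natCast]
  rw [List.getD_eq_getElem?_getD, List.getElem?_append_right (by omega)]
  simp

def nextRE (rest : List (Int × Int)) : Bool :=
  match rest with
  | (w, _) :: _ => w == 0
  | [] => false

theorem bridge2 (rest : List (Int × Int)) : ∀ (pre : List (Int × Int)) (out : List (List Int)),
    (PySem.List.enumerate rest (pre.length : Int)).foldl (bodyB (pre ++ rest)) out
      = out ++ pyEmit (prevE pre) rest := by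
  induction rest with
  | nil => intro pre out; simp [PySem.List.enumerate_nil, pyEmit]
  | cons r rest ih =>
    intro pre out
    obtain ⟨v, n⟩ := r
    rw [PySem.List.enumerate_cons, List.foldl_cons]
    have hbody : bodyB (pre ++ (v, n) :: rest) out ((pre.length : Int), (v, n))
        = out ++ (if v ≠ 0 ∧ n ≥ 2 then
            [[v, (if prevE pre then (1:Int) else 0) +
              (if nextRE rest = true then (1:Int) else 0), n]]
          else []) := by
      simp only [bodyB, EMPTY]
      have hL : ((pre.length : Int) > 0 ∧
          ((PySem.List.pyGetD (pre ++ (v, n) :: rest) ((pre.length : Int) - 1) (0, 0)).1 == (0:Int)) = true)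
          ↔ (prevE pre = true) := by
        cases hp : pre with
        | nil => simp [prevE]
        | cons q qs =>
          rw [← hp]
          have hne : pre ≠ [] := by simp [hp]
          rw [pyGetD_append_last pre ((v, n) :: rest) (0, 0) hne]
          have hlen : (0:Int) < (pre.length : Int) := by
            exact_mod_cast List.length_pos_of_ne_nil hne
          rw [prevE, List.getLast?_eq_some_getLast hne]
          simp
          exact fun _ => List.length_pos_of_ne_nil hne
      have hR : ((pre.length : Int) + 1 < (((pre ++ (v, n) :: rest).length : Nat) : Int) ∧
          ((PySem.List.pyGetD (pre ++ (v, n) :: rest) ((pre.length : Int) + 1) (0, 0)).1 == (0:Int)) = true)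
          ↔ (nextRE rest = true) := by
        cases rest with
        | nil => simp [nextRE]
        | cons w ws =>
          obtain ⟨w1, w2⟩ := w
          rw [pyGetD_append_next pre (v, n) (w1, w2) ws (0, 0)]
          have hlt : (pre.length : Int) + 1 < (((pre ++ (v, n) :: (w1, w2) :: ws).length : Nat) : Int) := by
            simp [List.length_append]
            try omega
          simp [nextRE]
      simp only [hL, hR]
      by_cases hc : v ≠ 0 ∧ n ≥ 2 <;> simp [hc]
    rw [hbody]
    have hpre : ((pre.length : Int) + 1) = (((pre ++ [(v, n)]).length : Nat) : Int) := by
      simp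
    rw [hpre]
    have := ih (pre ++ [(v, n)]) (out ++ (if v ≠ 0 ∧ n ≥ 2 then
            [[v, (if prevE pre then (1:Int) else 0) +
              (if nextRE rest = true then (1:Int) else 0), n]]
          else []))
    simp only [List.append_assoc, List.singleton_append] at this
    rw [this]
    congr 1
    rw [show pyEmit (prevE pre) ((v, n) :: rest)
        = if v ≠ EMPTY ∧ n ≥ 2 then
            [v, (if prevE pre then (1:Int) else 0) +
              (if (match rest with | (w, _) :: _ => w == EMPTY | [] => false) then (1:Int) else 0),
             n] :: pyEmit (v == EMPTY) rest
          else pyEmit (v == EMPTY) rest from rfl]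
    have hpe : prevE (pre ++ [(v, n)]) = (v == (0:Int)) := by
      simp [prevE]
    rw [hpe]
    simp only [EMPTY]
    cases rest <;> by_cases hc : v ≠ 0 ∧ n ≥ 2 <;> simp [nextRE, hc]

theorem alt_eq (array : List Int) :
    get_sequences_in_array_alt array = pyEmit false (pyRuns array) := by
  show (PySem.List.enumerate (array.foldl stepRuns []) 0).foldl
      (bodyB (array.foldl stepRuns [])) [] = _
  rw [runs_eq]
  have := bridge2 (pyRuns array) [] []
  simpa [prevE] using this

theorem get_sequences_in_array_spec : Claim_equal_get_sequences_in_array := by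
  unfold Claim_equal_get_sequences_in_array
  intro array _
  unfold Spec_get_sequences_in_array
  rw [alt_eq]
  cases array with
  | nil => simp [get_sequences_in_array, PySem.List.enumerate_nil, pyRuns, pyEmit]
  | cons a t =>
    rw [show get_sequences_in_array (a :: t)
        = finalizeA ((PySem.List.enumerate (a :: t) 0).foldl (bodyA (a :: t)) ([], [], 0))
        from rfl]
    rw [PySem.List.enumerate_cons, List.foldl_cons]
    rw [show bodyA (a :: t) ([], [], 0) (0, a) = ([], [], 0) from by simp [bodyA]]
    have hb := bridge t [a] (([] : List (List Int)), ([] : List Int), (0 : Int)) (by simp)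
    norm_num [List.getLast_singleton] at hb
    norm_num [hb]
    rw [show (([] : List (List Int)), ([] : List Int), (0 : Int))
        = (([] : List (List Int)), tmpOf a false 1, opOf a false) from by simp [tmpOf, opOf]]
    rw [main_lemma t a false 1 [] (le_refl 1), emitCont_one]
    rfl
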